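-- pv_equiv track=rewrite | github.com/entelecheia/ekorpkit | ekorpkit/preprocessors/normalizer.py | bracket_level
-- ===== SOURCE A (Python) =====
-- def bracket_level(text, open={"(", "[", "{"}, close={")", "]", "}"}):
--     """Return 0 if string contains balanced brackets or no brackets."""
--     level = 0
--     for c in text:
--         if c in open:
--             level += 1
--         elif c in close:
--             level -= 1
--     return level
-- ===== SOURCE B (Python) =====
-- def bracket_level(text, open_={"(", "[", "{"}, close={")", "]", "}"}):
--     """Return 0 if string contains balanced brackets or no brackets."""
--     counts = {}
--     for ch in text:
--         counts[ch] = counts.get(ch, 0) + 1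
--     return sum(counts.get(c, 0) for c in open_) - sum(counts.get(c, 0) for c in close)
-- ===== Notes on version B (the rewrite author's own statement) =====
-- stated objective: alternative
-- what changed: B builds a character-frequency table of the whole text once and then computes the level as the sum of counts over the opening-bracket set minus the sum over the closing-bracket set, instead of A's per-character branching scan with a running level; Pre_ excludes bracket sets given with duplicate elements or a common element, where A's elif order (open wins, duplicates counted once) is an accidental corner.
-- outside the precondition, e.g. on bracket_level('(', {'('}, {'('}): A returns 1, B returns 0
import Mathlib
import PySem

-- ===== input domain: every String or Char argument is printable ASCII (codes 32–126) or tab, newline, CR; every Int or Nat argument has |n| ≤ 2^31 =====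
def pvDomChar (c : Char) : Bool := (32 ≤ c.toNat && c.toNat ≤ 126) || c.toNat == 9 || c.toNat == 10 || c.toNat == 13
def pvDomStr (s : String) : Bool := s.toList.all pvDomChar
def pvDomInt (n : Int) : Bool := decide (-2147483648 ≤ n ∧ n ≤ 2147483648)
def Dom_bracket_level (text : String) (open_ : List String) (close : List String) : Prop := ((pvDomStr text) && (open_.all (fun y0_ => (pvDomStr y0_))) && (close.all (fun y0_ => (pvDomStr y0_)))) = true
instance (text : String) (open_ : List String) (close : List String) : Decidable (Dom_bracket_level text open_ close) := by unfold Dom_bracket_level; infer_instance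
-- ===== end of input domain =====

-- B computes the level from a character-frequency table (sum of open counts minus sum of close counts)
-- instead of A's per-character branching scan; return-value equivalence on Pre_ (nodup, disjoint bracket sets).


-- ===== PORT A =====
-- level = 0; for c in text: if c in open: level += 1 elif c in close: level -= 1; return level
def bracket_level (text : String) (open_ : List String) (close : List String) : Int :=
  text.toList.foldl (fun level c =>
    if String.singleton c ∈ open_ then level + 1
    else if String.singleton c ∈ close then level - 1
    else level) 0

-- ===== PORT B =====
-- counts = {}; for ch in text: counts[ch] = counts.get(ch, 0) + 1
-- return sum(counts.get(c, 0) for c in open) - sum(counts.get(c, 0) for c in close)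
def bracket_level_alt (text : String) (open_ : List String) (close : List String) : Int :=
  let counts : PySem.Dict String Int :=
    text.toList.foldl (fun d ch =>
      d.insert (String.singleton ch) (d.getD (String.singleton ch) 0 + 1)) PySem.Dict.empty
  (open_.foldl (fun s c => s + counts.getD c 0) 0)
    - (close.foldl (fun s c => s + counts.getD c 0) 0)

-- ===== PRECONDITION & SPEC =====
-- Pre_ excludes open_/close lists that are not faithful representations of the Python sets (duplicate
-- elements) or share an element: there A's elif order (open wins, duplicates counted once) and B's
-- summed counts are both defensible readings of an unspecified corner.
def Pre_bracket_level (text : String) (open_ : List String) (close : List String) : Prop :=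
  open_.Nodup ∧ close.Nodup ∧ ∀ s ∈ open_, s ∉ close
instance (text : String) (open_ : List String) (close : List String) : Decidable (Pre_bracket_level text open_ close) := by unfold Pre_bracket_level; infer_instance

def pvWitness_bracket_level : String × List String × List String :=
  ("(a[b]{c)}", ["(", "[", "{"], [")", "]", "}"])

def Spec_bracket_level (text : String) (open_ : List String) (close : List String) (out : Int) : Prop := out = bracket_level_alt text open_ close
instance (text : String) (open_ : List String) (close : List String) (out : Int) : Decidable (Spec_bracket_level text open_ close out) := by unfold Spec_bracket_level; infer_instance

-- ===== CLAIM (what is proved, stated in full; the proofs are below) =====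
def Claim_equal_bracket_level : Prop := ∀ (text : String) (open_ : List String) (close : List String), Dom_bracket_level text open_ close → Pre_bracket_level text open_ close → Spec_bracket_level text open_ close (bracket_level text open_ close)

-- ===== LEMMAS AND PROOFS =====

-- generic: a fold that only adds f x equals init + sum of the mapped list
theorem pvFoldlAddEqSum {α : Type} (f : α → Int) (l : List α) (init : Int) :
    l.foldl (fun s x => s + f x) init = init + (l.map f).sum := by
  induction l generalizing init with
  | nil => simp
  | cons x t ih => simp [List.foldl_cons, ih (init + f x)]; ring

-- the indicator sum vanishes when x is not in L
theorem pvSumIndicatorZero (x : String) (L : List String) (h : x ∉ L) :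
    (L.map (fun k => if x = k then (1 : Int) else 0)).sum = 0 := by
  induction L with
  | nil => simp
  | cons a t ih =>
    simp only [List.mem_cons, not_or] at h
    simp [List.map_cons, ih h.2, h.1]

-- counting a single element across a nodup list: total indicator
theorem pvSumIndicator (x : String) (L : List String) (h : L.Nodup) :
    (L.map (fun k => if x = k then (1 : Int) else 0)).sum
      = if x ∈ L then (1 : Int) else 0 := by
  induction L with
  | nil => simp
  | cons a t ih =>
    rcases List.nodup_cons.mp h with ⟨ha, ht⟩
    by_cases hx : x = a
    · subst hx
      simp [List.map_cons, pvSumIndicatorZero x t ha]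
    · simp [List.map_cons, ih ht, hx]

-- summed counts over a nodup list L = number of elements of ms that lie in L
theorem pvSumCount (L : List String) (h : L.Nodup) (ms : List String) :
    (L.map (fun k => ((ms.count k : Int)))).sum
      = ((ms.filter (fun x => x ∈ L)).length : Int) := by
  induction ms with
  | nil => simp
  | cons x t ih =>
    calc (L.map (fun k => (((x :: t).count k : Int)))).sum
        = (L.map (fun k => (t.count k : Int) + (if x = k then (1 : Int) else 0))).sum := by
          congr 1; apply List.map_congr_left; intro k _
          rw [List.count_cons]
          by_cases hk : x = k
          · subst hk; simp
          · simp [fun h : k = x => hk h.symm]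
      _ = (L.map (fun k => (t.count k : Int))).sum
            + (L.map (fun k => if x = k then (1 : Int) else 0)).sum := by
          rw [← List.sum_map_add]
      _ = ((t.filter (fun x => x ∈ L)).length : Int) + (if x ∈ L then 1 else 0) := by
          rw [ih, pvSumIndicator x L h]
      _ = (((x :: t).filter (fun x => x ∈ L)).length : Int) := by
          by_cases hx : x ∈ L <;> simp [hx]

-- A's per-character delta summed = (#open hits) - (#close hits), under disjointness
theorem pvDeltaSum (open_ close : List String) (hdisj : ∀ s ∈ open_, s ∉ close)
    (ms : List String) :
    (ms.map (fun x => if x ∈ open_ then (1 : Int) else if x ∈ close then -1 else 0)).sum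
      = ((ms.filter (fun x => x ∈ open_)).length : Int)
        - ((ms.filter (fun x => x ∈ close)).length : Int) := by
  induction ms with
  | nil => simp
  | cons x t ih =>
    by_cases ho : x ∈ open_
    · have hc : x ∉ close := hdisj x ho
      simp [List.map_cons, ho, hc, ih]; ring
    · by_cases hc : x ∈ close
      · simp [List.map_cons, ho, hc, ih]; ring
      · simp [List.map_cons, ho, hc, ih]

-- A as a sum of per-character deltas
theorem pvAEq (text : String) (open_ close : List String) :
    bracket_level text open_ close
      = ((text.toList.map String.singleton).map
          (fun x => if x ∈ open_ then (1 : Int) else if x ∈ close then -1 else 0)).sum := by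
  unfold bracket_level
  have hfun : (fun (level : Int) c =>
      if String.singleton c ∈ open_ then level + 1
      else if String.singleton c ∈ close then level - 1
      else level)
    = (fun (level : Int) c => level +
        (if String.singleton c ∈ open_ then (1 : Int)
         else if String.singleton c ∈ close then -1 else 0)) := by
    funext level c; split_ifs <;> ring
  rw [hfun, pvFoldlAddEqSum, List.map_map]
  simp [Function.comp_def]

-- B as summed counts over the singleton-mapped text
theorem pvBEq (text : String) (open_ close : List String) :
    bracket_level_alt text open_ close
      = (open_.map (fun k => (((text.toList.map String.singleton).count k : Int)))).sum
        - (close.map (fun k => (((text.toList.map String.singleton).count k : Int)))).sum := by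
  unfold bracket_level_alt
  have hcounts : (text.toList.foldl (fun d ch =>
        d.insert (String.singleton ch) (d.getD (String.singleton ch) 0 + 1))
        (PySem.Dict.empty : PySem.Dict String Int))
      = (text.toList.map String.singleton).foldl
          (fun d s => d.insert s (d.getD s 0 + 1)) PySem.Dict.empty := by
    rw [List.foldl_map]
  simp only [hcounts, PySem.Dict.foldl_insert_getD_add_one_eq_counter]
  rw [pvFoldlAddEqSum (fun c => (PySem.Dict.counter (text.toList.map String.singleton)).getD c 0) open_,
      pvFoldlAddEqSum (fun c => (PySem.Dict.counter (text.toList.map String.singleton)).getD c 0) close]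
  simp [PySem.Dict.getD_counter]

-- ===== VERDICT (by name: the statement is the Claim_ definition above) =====
theorem bracket_level_spec : Claim_equal_bracket_level := by
  intro text open_ close _ hpre
  rcases hpre with ⟨hno, hnc, hdisj⟩
  unfold Spec_bracket_level
  rw [pvAEq, pvBEq,
      pvSumCount open_ hno (text.toList.map String.singleton),
      pvSumCount close hnc (text.toList.map String.singleton),
      pvDeltaSum open_ close hdisj]
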